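-- pv_equiv track=rewrite | github.com/Aryam2121/Synapse-AI | backend/agents/code_agent.py | _parse_bug_report
-- ===== SOURCE A (Python) =====
-- from typing import Dict, Any, List
--
-- def _parse_bug_report(report: str) -> List[Dict[str, Any]]:
--     """Parse bug report into structured format"""
--
--     # Simplified parsing - in production, use more sophisticated NLP
--     bugs = []
--
--     lines = report.split('\n')
--     current_bug = {}
--
--     for line in lines:
--         if 'severity' in line.lower():
--             if current_bug:
--                 bugs.append(current_bug)
--             current_bug = {"description": line}
--         elif current_bug:
--             current_bug["description"] += "\n" + line
--
--     if current_bug: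
--         bugs.append(current_bug)
--
--     return bugs if bugs else [{"description": report}]
-- ===== SOURCE B (Python) =====
-- def _parse_bug_report(report: str):
--     """Parse bug report into structured format"""
--     lines = report.split('\n')
--     idx = [i for i, l in enumerate(lines) if 'severity' in l.lower()]
--     if not idx:
--         return [{"description": report}]
--     return [{"description": "\n".join(lines[a:b])}
--             for a, b in zip(idx, idx[1:] + [len(lines)])]
-- ===== Notes on version B (the rewrite author's own statement) =====
-- stated objective: alternative
-- what changed: Replaces A's stateful single-pass accumulator (a growing current-bug dict with += concatenation) by a two-phase index-then-slice pass: first collect the indices of severity lines, then build each bug with one slice and one join between consecutive boundary indices.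
import Mathlib
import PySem

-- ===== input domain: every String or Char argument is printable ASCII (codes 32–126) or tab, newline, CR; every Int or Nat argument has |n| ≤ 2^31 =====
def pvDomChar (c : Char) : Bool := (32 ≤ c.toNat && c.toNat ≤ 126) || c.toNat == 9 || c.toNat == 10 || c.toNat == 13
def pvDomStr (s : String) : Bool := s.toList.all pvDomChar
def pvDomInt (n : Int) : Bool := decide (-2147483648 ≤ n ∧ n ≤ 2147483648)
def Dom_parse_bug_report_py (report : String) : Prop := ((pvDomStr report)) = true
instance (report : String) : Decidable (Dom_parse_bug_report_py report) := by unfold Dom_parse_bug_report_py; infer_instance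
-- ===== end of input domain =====

-- B replaces A's stateful single-pass accumulator by a two-phase index-then-slice pass
-- (collect severity-line indices, then slice+join each segment); objective: alternative, same cost.


-- shared built-ins: 'severity' in line.lower(), and report.split('\n') (sep ≠ "", so split? is always some)
def pvSev (line : String) : Bool := PySem.Str.isIn "severity" (PySem.Str.lower line)
def pvLines (report : String) : List String := (PySem.Str.split? report "\n").getD []

-- ===== PORT A =====
-- loop body of A: state = (bugs so far, current_bug dict)
def pvStepA (st : List (List (String × String)) × PySem.Dict String String) (line : String) :
    List (List (String × String)) × PySem.Dict String String :=
  if pvSev line then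
    ((if st.2.items.isEmpty then st.1 else st.1 ++ [st.2.items]),
     PySem.Dict.ofList [("description", line)])
  else if st.2.items.isEmpty then st
  else (st.1, st.2.insert "description" (st.2.getD "description" "" ++ "\n" ++ line))

def parse_bug_report_py (report : String) : List (List (String × String)) :=
  let st := (pvLines report).foldl pvStepA ([], PySem.Dict.empty)
  let bugs := if st.2.items.isEmpty then st.1 else st.1 ++ [st.2.items]
  if bugs.isEmpty then [[("description", report)]] else bugs

-- ===== PORT B =====
-- B: idx = [i for i, l in enumerate(lines) if 'severity' in l.lower()]; if no boundary,
-- one bug with the whole report; else one bug per consecutive boundary pair (a, b),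
-- its description = '\n'.join(lines[a:b]) (lines[a:b] is PySem.List.slice, exact Python slice).
def parse_bug_report_py_alt (report : String) : List (List (String × String)) :=
  let lines := pvLines report
  let idx := ((PySem.List.enumerate lines 0).filter (fun p => pvSev p.2)).map Prod.fst
  match idx with
  | [] => [[("description", report)]]
  | _ =>
    (idx.zip (idx.drop 1 ++ [(lines.length : Int)])).map
      (fun ab => [("description",
        PySem.Str.join "\n" (PySem.List.slice lines (some ab.1) (some ab.2)))])

-- ===== PRECONDITION & SPEC =====
def Spec_parse_bug_report_py (report : String) (out : List (List (String × String))) : Prop := out = parse_bug_report_py_alt report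
instance (report : String) (out : List (List (String × String))) : Decidable (Spec_parse_bug_report_py report out) := by unfold Spec_parse_bug_report_py; infer_instance

-- ===== CLAIM (what is proved, stated in full; the proofs are below) =====
def Claim_equal_parse_bug_report_py : Prop := ∀ (report : String), Dom_parse_bug_report_py report → Spec_parse_bug_report_py report (parse_bug_report_py report)

-- ===== LEMMAS AND PROOFS =====

-- reference foldr: (segments as line lists, leading non-severity lines)
def pvSpecL (ls : List String) : List (List String) × List String :=
  ls.foldr
    (fun l st => if pvSev l then ((l :: st.2) :: st.1, []) else (st.1, l :: st.2))
    ([], [])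

def pvWrap (s : String) : List (String × String) := [("description", s)]

def pvFin (st : List (List (String × String)) × PySem.Dict String String) :
    List (List (String × String)) :=
  if st.2.items.isEmpty then st.1 else st.1 ++ [st.2.items]

-- nat-level severity indices (shadow of B's enumerate/filter pass)
def pvIdxN : List String → List Nat
  | [] => []
  | l :: ls => if pvSev l then 0 :: (pvIdxN ls).map (· + 1) else (pvIdxN ls).map (· + 1)

theorem pvSpecL_cons (l : String) (ls : List String) :
    pvSpecL (l :: ls) =
      if pvSev l then ((l :: (pvSpecL ls).2) :: (pvSpecL ls).1, [])
      else ((pvSpecL ls).1, l :: (pvSpecL ls).2) := rfl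

theorem pv_join_singleton (s : String) : PySem.Str.join "\n" [s] = s := by
  simp [PySem.Str.join]

theorem pv_join_cons (s l : String) (t : List String) :
    PySem.Str.join "\n" (s :: l :: t) = PySem.Str.join "\n" ((s ++ "\n" ++ l) :: t) := by
  simp [PySem.Str.join, PySem.Chars.join]
  congr 1
  cases t <;> simp [List.intercalate]

-- ---------- A side ----------
theorem pvStepA_sev (bugs : List (List (String × String))) (d : PySem.Dict String String)
    (l : String) (h : pvSev l = true) :
    pvStepA (bugs, d) l =
      ((if d.items.isEmpty then bugs else bugs ++ [d.items]),
       PySem.Dict.mk [("description", l)]) := by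
  simp only [pvStepA, h, if_true]
  rfl

theorem pvStepA_nosev_one (bugs : List (List (String × String))) (s l : String)
    (h : pvSev l = false) :
    pvStepA (bugs, PySem.Dict.mk [("description", s)]) l =
      (bugs, PySem.Dict.mk [("description", s ++ "\n" ++ l)]) := by
  simp [pvStepA, h, PySem.Dict.insert, PySem.Dict.getD, PySem.Dict.get?]

theorem pvStepA_nosev_empty (bugs : List (List (String × String))) (l : String)
    (h : pvSev l = false) :
    pvStepA (bugs, PySem.Dict.empty) l = (bugs, PySem.Dict.empty) := by
  simp [pvStepA, h, PySem.Dict.empty]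

-- the starting bugs list is a pure prefix of A's fold result
theorem pvA_prefix (ls : List String) (bugs : List (List (String × String)))
    (d : PySem.Dict String String) :
    ls.foldl pvStepA (bugs, d) =
      (bugs ++ (ls.foldl pvStepA ([], d)).1, (ls.foldl pvStepA ([], d)).2) := by
  induction ls generalizing bugs d with
  | nil => simp
  | cons l ls ih =>
    simp only [List.foldl_cons, pvStepA]
    by_cases h : pvSev l = true
    · simp only [h, if_true]
      rw [ih (bugs := if (bugs, d).2.items.isEmpty then (bugs, d).1 else (bugs, d).1 ++ [(bugs, d).2.items])]
      rw [ih (bugs := if (([] : List (List (String × String))), d).2.items.isEmpty then (([] : List (List (String × String))), d).1 else [] ++ [d.items])]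
      by_cases he : d.items.isEmpty <;> simp [he]
    · simp only [h]
      by_cases he : d.items.isEmpty <;> simp only [he, if_true]
      · exact ih bugs d
      · rw [ih, ih (bugs := [])]; simp

theorem pvFin_prefix (bugs : List (List (String × String)))
    (st : List (List (String × String)) × PySem.Dict String String) :
    pvFin (bugs ++ st.1, st.2) = bugs ++ pvFin st := by
  by_cases he : st.2.items.isEmpty <;> simp [pvFin, he]

-- main invariant: running A's loop from current_bug = {"description": s}
theorem pvA_run (ls : List String) (s : String) :
    pvFin (ls.foldl pvStepA ([], PySem.Dict.mk [("description", s)])) =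
      pvWrap (PySem.Str.join "\n" (s :: (pvSpecL ls).2)) ::
        (pvSpecL ls).1.map (fun g => pvWrap (PySem.Str.join "\n" g)) := by
  induction ls generalizing s with
  | nil => simp [pvFin, pvSpecL, pvWrap, pv_join_singleton]
  | cons l ls ih =>
    rw [List.foldl_cons]
    by_cases h : pvSev l = true
    · rw [pvStepA_sev _ _ _ h]
      have : (((PySem.Dict.mk [("description", s)]).items.isEmpty) = false) := rfl
      rw [this]
      simp only [Bool.false_eq_true, if_false, List.nil_append]
      rw [pvA_prefix, pvFin_prefix, ih l, pvSpecL_cons]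
      simp [h, pv_join_singleton, pvWrap]
    · rw [pvStepA_nosev_one _ _ _ (by simpa using h), ih, pvSpecL_cons]
      simp only [h, Bool.false_eq_true, if_false]
      rw [← pv_join_cons]

-- A's whole loop result
theorem pvA_out (ls : List String) :
    pvFin (ls.foldl pvStepA ([], PySem.Dict.empty)) =
      (pvSpecL ls).1.map (fun g => pvWrap (PySem.Str.join "\n" g)) := by
  induction ls with
  | nil => simp [pvFin, pvSpecL, PySem.Dict.empty]
  | cons l ls ih =>
    rw [List.foldl_cons]
    by_cases h : pvSev l = true
    · rw [pvStepA_sev _ _ _ h]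
      have : (((PySem.Dict.empty : PySem.Dict String String)).items.isEmpty) = true := rfl
      rw [this, if_pos rfl, pvA_run, pvSpecL_cons]
      simp [h]
    · rw [pvStepA_nosev_empty _ _ (by simpa using h), ih, pvSpecL_cons]
      simp [h]

-- ---------- B side ----------
-- B's enumerate/filter index pass = the nat shadow shifted by the start
theorem pvIdx_enum (ls : List String) (s : Int) :
    ((PySem.List.enumerate ls s).filter (fun p => pvSev p.2)).map Prod.fst =
      (pvIdxN ls).map (fun (i : Nat) => ((i : Int) + s)) := by
  induction ls generalizing s with
  | nil => simp [PySem.List.enumerate_nil, pvIdxN]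
  | cons l ls ih =>
    rw [PySem.List.enumerate_cons]
    by_cases h : pvSev l = true
    · simp only [pvIdxN, h, if_true, List.filter_cons, List.map_cons]
      rw [ih (s + 1)]
      simp only [List.map_map, Nat.cast_zero, zero_add, List.cons.injEq]
      exact ⟨trivial, List.map_congr_left fun i _ => by simp only [Function.comp]; push_cast; ring⟩
    · simp only [pvIdxN, h, List.filter_cons, Bool.false_eq_true, if_false]
      rw [ih (s + 1)]
      simp only [List.map_map]
      exact List.map_congr_left fun i _ => by simp only [Function.comp]; push_cast; ring

-- nat-level slices between consecutive boundaries
def pvSlices (ls : List String) : List (List String) :=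
  ((pvIdxN ls).zip ((pvIdxN ls).drop 1 ++ [ls.length])).map
    (fun ab => (ls.drop ab.1).take (ab.2 - ab.1))

-- shifting all boundaries by one and consing a line leaves the slices unchanged
theorem pv_shift (l : String) (ls : List String) (m : List Nat) :
    (((m.map (· + 1)).zip ((m.map (· + 1)).drop 1 ++ [ls.length + 1])).map
        (fun ab => ((l :: ls).drop ab.1).take (ab.2 - ab.1))) =
      ((m.zip (m.drop 1 ++ [ls.length])).map (fun ab => (ls.drop ab.1).take (ab.2 - ab.1))) := by
  have h1 : (m.map (· + 1)).drop 1 ++ [ls.length + 1] = (m.drop 1 ++ [ls.length]).map (· + 1) := by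
    simp
  rw [h1, List.zip_map, List.map_map]
  apply List.map_congr_left
  intro ab _
  simp [Nat.succ_sub_succ]

theorem pv_headD_shift (m : List Nat) (n : Nat) :
    (m.map (· + 1)).headD (n + 1) = m.headD n + 1 := by
  cases m <;> simp

-- combined invariant: slices = the segments, and the prefix up to the first boundary
theorem pvB_main (ls : List String) :
    pvSlices ls = (pvSpecL ls).1 ∧
      ls.take ((pvIdxN ls).headD ls.length) = (pvSpecL ls).2 := by
  induction ls with
  | nil => simp [pvSlices, pvIdxN, pvSpecL]
  | cons l ls ih =>
    obtain ⟨ih1, ih2⟩ := ih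
    by_cases h : pvSev l = true
    · have hidx : pvIdxN (l :: ls) = 0 :: (pvIdxN ls).map (· + 1) := by simp [pvIdxN, h]
      refine ⟨?_, by rw [pvSpecL_cons]; simp [h, hidx]⟩
      rw [pvSpecL_cons]
      simp only [h, if_true]
      cases hm : pvIdxN ls with
      | nil =>
        have hs1 : (pvSpecL ls).1 = [] := by simpa [pvSlices, hm] using ih1.symm
        have hs2 : (pvSpecL ls).2 = ls := by simpa [hm] using ih2.symm
        simp [pvSlices, hidx, hm, hs1, hs2]
      | cons x xs =>
        have ih1' : (((x :: xs).zip (xs ++ [ls.length])).map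
            (fun ab => (ls.drop ab.1).take (ab.2 - ab.1))) = (pvSpecL ls).1 := by
          simpa [pvSlices, hm] using ih1
        have ih2' : ls.take x = (pvSpecL ls).2 := by simpa [hm] using ih2
        have hshift := pv_shift l ls (x :: xs)
        simp only [List.map_cons, List.drop_succ_cons] at hshift
        simp only [pvSlices, hidx, hm, List.map_cons, List.length_cons, List.drop_succ_cons,
          List.cons_append, List.zip_cons_cons, Nat.sub_zero, List.drop_zero,
          List.take_succ_cons, List.cons.injEq]
        constructor
        · exact ⟨trivial, ih2'⟩
        · exact hshift.trans ih1'
    · have h' : pvSev l = false := by simpa using h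
      have hidx : pvIdxN (l :: ls) = (pvIdxN ls).map (· + 1) := by simp [pvIdxN, h']
      refine ⟨?_, ?_⟩
      · rw [pvSpecL_cons]
        simp only [h', Bool.false_eq_true, if_false]
        have hshift := pv_shift l ls (pvIdxN ls)
        simp only [pvSlices, hidx, List.length_cons]
        exact hshift.trans ih1
      · rw [pvSpecL_cons]
        simp only [h', Bool.false_eq_true, if_false]
        rw [hidx, List.length_cons, pv_headD_shift (pvIdxN ls) ls.length,
          List.take_succ_cons, ih2]

-- B's output rewritten through the nat shadow
theorem pvB_out (report : String) :
    parse_bug_report_py_alt report =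
      (match pvIdxN (pvLines report) with
       | [] => [[("description", report)]]
       | _ => (pvSpecL (pvLines report)).1.map (fun g => pvWrap (PySem.Str.join "\n" g))) := by
  unfold parse_bug_report_py_alt
  have he := pvIdx_enum (pvLines report) 0
  simp only [add_zero] at he
  simp only [he]
  cases hm : pvIdxN (pvLines report) with
  | nil => simp
  | cons x xs =>
    have hseg : (((x :: xs).zip (xs ++ [(pvLines report).length])).map
        (fun ab => ((pvLines report).drop ab.1).take (ab.2 - ab.1))) =
        (pvSpecL (pvLines report)).1 := by
      have hmain := (pvB_main (pvLines report)).1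
      simpa [pvSlices, hm] using hmain
    have h1 : (((x :: xs).map (fun (i : Nat) => (i : Int))).drop 1) ++
        [((pvLines report).length : Int)] =
        ((x :: xs).drop 1 ++ [(pvLines report).length]).map (fun (i : Nat) => (i : Int)) := by
      simp
    simp only [List.map_cons]
    rw [show ((x : Int) :: (xs.map (fun (i : Nat) => (i : Int))) : List Int) =
        ((x :: xs).map (fun (i : Nat) => (i : Int))) from rfl]
    rw [h1, List.zip_map, List.map_map]
    rw [← hseg, List.map_map]
    apply List.map_congr_left
    intro ab _
    simp [Function.comp, PySem.List.slice_natCast, pvWrap]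

-- ===== VERDICT (by name: the statement is the Claim_ definition above) =====
theorem parse_bug_report_py_spec : Claim_equal_parse_bug_report_py := by
  intro report _
  show parse_bug_report_py report = parse_bug_report_py_alt report
  rw [pvB_out]
  unfold parse_bug_report_py
  have hA := pvA_out (pvLines report)
  simp only [pvFin] at hA
  simp only [hA]
  cases hm : pvIdxN (pvLines report) with
  | nil =>
    have hs1 : (pvSpecL (pvLines report)).1 = [] := by
      have hmain := (pvB_main (pvLines report)).1
      simpa [pvSlices, hm] using hmain.symm
    simp [hs1, pvWrap]
  | cons x xs =>
    have hs1 : (pvSpecL (pvLines report)).1 ≠ [] := by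
      have hmain := (pvB_main (pvLines report)).1
      rw [← hmain]
      simp only [pvSlices, hm]
      cases xs <;> simp
    rw [if_neg (by simpa using hs1)]
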